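-- pv_equiv track=rewrite | github.com/linhdvu14/cp-sols | sols/Google/KickStart/2019/2019_G/B_The_Equation.py | solve
-- ===== SOURCE A (Python) =====
-- def solve(n,m,nums):
--     count_zeros = [0]*50
--     count_ones = [0]*50
--     for num in nums:
--         for i in range(49,-1,-1):
--             b = (num >> i) & 1
--             if b == 0:
--                 count_zeros[i] += 1
--             else:
--                 count_ones[i] += 1
--
--     k = 0
--     csum = 0
--     for i in range(49,-1,-1):
--         mn = 0
--         for j in range(i-1,-1,-1):
--             mn += (1 << j) * min(count_ones[j],count_zeros[j])
--         if csum + (1 << i)*count_zeros[i] + mn <= m: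
--             k = (k << 1) + 1
--             csum += (1 << i)*count_zeros[i]
--         elif csum + (1 << i)*count_ones[i] + mn <= m:
--             k = (k << 1)
--             csum += (1 << i)*count_ones[i]
--         else:
--             return -1
--     return k
-- ===== SOURCE B (Python) =====
-- def solve(n, m, nums):
--     # one pass per bit: popcount table by comprehension, then a prefix table of
--     # minimal contributions, then a single greedy descent (no inner rescan).
--     ones = [sum((num >> j) & 1 for num in nums) for j in range(50)]
--     zeros = [len(nums) - c for c in ones]
--     pref = []
--     acc = 0
--     for j in range(50):
--         pref.append(acc)
--         acc += (1 << j) * min(ones[j], zeros[j])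
--     k = 0
--     csum = 0
--     for i in range(49, -1, -1):
--         step_zero = (1 << i) * zeros[i]
--         step_one = (1 << i) * ones[i]
--         if csum + step_zero + pref[i] <= m:
--             k = 2 * k + 1
--             csum += step_zero
--         elif csum + step_one + pref[i] <= m:
--             k = 2 * k
--             csum += step_one
--         else:
--             return -1
--     return k
-- ===== Notes on version B (the rewrite author's own statement) =====
-- stated objective: faster
-- what changed: Replaces A's per-number mutation loop with a per-bit popcount comprehension (zeros derived as len-ones), and replaces the quadratic inner rescan of the greedy loop with a precomputed prefix table of minimal lower-bit contributions, so the greedy descent is a single pass with table lookups.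
import Mathlib
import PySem

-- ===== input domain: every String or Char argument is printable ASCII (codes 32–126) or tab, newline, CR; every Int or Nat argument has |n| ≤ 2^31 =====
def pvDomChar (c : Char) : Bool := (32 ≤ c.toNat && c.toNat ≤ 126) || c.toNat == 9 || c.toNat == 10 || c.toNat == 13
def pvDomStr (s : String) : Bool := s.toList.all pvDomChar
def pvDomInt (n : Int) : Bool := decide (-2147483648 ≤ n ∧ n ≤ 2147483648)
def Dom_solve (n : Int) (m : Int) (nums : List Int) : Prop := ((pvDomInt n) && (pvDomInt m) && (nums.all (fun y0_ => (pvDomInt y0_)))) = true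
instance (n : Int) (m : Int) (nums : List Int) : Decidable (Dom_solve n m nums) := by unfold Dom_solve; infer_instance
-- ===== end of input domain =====

-- B replaces A's per-number counting mutation with a per-bit popcount comprehension and
-- replaces the quadratic inner rescan of the greedy loop with a precomputed prefix table
-- of minimal lower-bit contributions, so the greedy descent is a single pass (measured
-- faster in a timing run; same return value, proved below).

-- ===== PORT A =====
-- Python '(num >> i) & 1': '>>' is Lean's '>>> (Nat)' on Int (arithmetic shift, exact also on
-- negatives), and '& 1' on any Python int is its low two's-complement bit, i.e. '% 2' (emod).
def pyBit (num : Int) (i : Int) : Int := (num >>> i.toNat) % 2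
-- Python '1 << i' for the loop indices i ≥ 0
def pyShl1 (i : Int) : Int := (1:Int) <<< i.toNat

-- body of A's inner 'for i in range(49,-1,-1)' over the pair (count_zeros, count_ones)
def stepBitA (num : Int) (q : List Int × List Int) (i : Int) : List Int × List Int :=
  let b := pyBit num i
  if b = 0 then (PySem.List.pySetD q.1 i (PySem.List.pyGetD q.1 i 0 + 1), q.2)
  else (q.1, PySem.List.pySetD q.2 i (PySem.List.pyGetD q.2 i 0 + 1))

def countsA (nums : List Int) : List Int × List Int :=
  nums.foldl (fun p num => (PySem.List.pyRange 49 (-1) (-1)).foldl (stepBitA num) p)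
    (List.replicate 50 0, List.replicate 50 0)

def loopA (m : Int) (cz co : List Int) : List Int → Int → Int → Int
  | [], k, _ => k
  | i :: rest, k, csum =>
    let mn := (PySem.List.pyRange (i - 1) (-1) (-1)).foldl
      (fun acc j => acc + pyShl1 j * min (PySem.List.pyGetD co j 0) (PySem.List.pyGetD cz j 0)) 0
    if csum + pyShl1 i * PySem.List.pyGetD cz i 0 + mn ≤ m then
      loopA m cz co rest ((k <<< (1:Nat)) + 1) (csum + pyShl1 i * PySem.List.pyGetD cz i 0)
    else if csum + pyShl1 i * PySem.List.pyGetD co i 0 + mn ≤ m then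
      loopA m cz co rest (k <<< (1:Nat)) (csum + pyShl1 i * PySem.List.pyGetD co i 0)
    else -1

def solve (n : Int) (m : Int) (nums : List Int) : Int :=
  let p := countsA nums
  loopA m p.1 p.2 (PySem.List.pyRange 49 (-1) (-1)) 0 0

-- ===== PORT B =====
def onesB (nums : List Int) : List Int :=
  (PySem.List.pyRange 0 50 1).map (fun j => nums.foldl (fun s num => s + pyBit num j) 0)

def zerosB (nums : List Int) (ones : List Int) : List Int :=
  ones.map (fun c => PySem.List.len nums - c)

-- body of B's 'for j in range(50)': state (pref, acc)
def prefStep (ones zeros : List Int) (q : List Int × Int) (j : Int) : List Int × Int :=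
  (q.1 ++ [q.2],
   q.2 + pyShl1 j * min (PySem.List.pyGetD ones j 0) (PySem.List.pyGetD zeros j 0))

def prefB (ones zeros : List Int) : List Int :=
  ((PySem.List.pyRange 0 50 1).foldl (prefStep ones zeros) ([], 0)).1

def loopB (m : Int) (ones zeros pref : List Int) : List Int → Int → Int → Int
  | [], k, _ => k
  | i :: rest, k, csum =>
    let stepZero := pyShl1 i * PySem.List.pyGetD zeros i 0
    let stepOne := pyShl1 i * PySem.List.pyGetD ones i 0
    if csum + stepZero + PySem.List.pyGetD pref i 0 ≤ m then
      loopB m ones zeros pref rest (2 * k + 1) (csum + stepZero)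
    else if csum + stepOne + PySem.List.pyGetD pref i 0 ≤ m then
      loopB m ones zeros pref rest (2 * k) (csum + stepOne)
    else -1

def solve_alt (n : Int) (m : Int) (nums : List Int) : Int :=
  let ones := onesB nums
  let zeros := zerosB nums ones
  let pref := prefB ones zeros
  loopB m ones zeros pref (PySem.List.pyRange 49 (-1) (-1)) 0 0

-- ===== PRECONDITION & SPEC =====
def Spec_solve (n : Int) (m : Int) (nums : List Int) (out : Int) : Prop := out = solve_alt n m nums
instance (n : Int) (m : Int) (nums : List Int) (out : Int) : Decidable (Spec_solve n m nums out) := by unfold Spec_solve; infer_instance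

-- ===== CLAIM (what is proved, stated in full; the proofs are below) =====
def Claim_equal_solve : Prop := ∀ (n : Int) (m : Int) (nums : List Int), Dom_solve n m nums → Spec_solve n m nums (solve n m nums)

-- ===== LEMMAS AND PROOFS =====

def onesF (nums : List Int) (j : Nat) : Int := (nums.map (fun num => pyBit num (j:Int))).sum
def zerosF (nums : List Int) (j : Nat) : Int := (nums.map (fun num => 1 - pyBit num (j:Int))).sum
def partialSum (t : Nat → Int) : Nat → Int
  | 0 => 0
  | n + 1 => partialSum t n + t n

theorem pyBit01 (num i : Int) : pyBit num i = 0 ∨ pyBit num i = 1 :=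
  Int.emod_two_eq (num >>> i.toNat)

theorem getD_set_of_lt (l : List Int) (n : Nat) (v : Int) (j : Nat) (hn : n < l.length) :
    (l.set n v).getD j 0 = if n = j then v else l.getD j 0 := by
  simp only [List.getD_eq_getElem?_getD, List.getElem?_set, hn, if_true]
  split <;> simp

theorem stepBitA_len (num : Int) (q : List Int × List Int) (i : Int) (hi0 : 0 ≤ i) :
    (stepBitA num q i).1.length = q.1.length ∧ (stepBitA num q i).2.length = q.2.length := by
  unfold stepBitA
  by_cases hb : pyBit num i = 0 <;>
    simp [hb, PySem.List.pySetD_of_nonneg _ _ hi0]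

theorem stepBitA_getD (num : Int) (q : List Int × List Int) (i : Int) (hi0 : 0 ≤ i) (hi50 : i < 50)
    (h1 : q.1.length = 50) (h2 : q.2.length = 50) (j : Nat) (_hj : j < 50) :
    (stepBitA num q i).1.getD j 0 = q.1.getD j 0 + (if (j:Int) = i then 1 - pyBit num (j:Int) else 0) ∧
    (stepBitA num q i).2.getD j 0 = q.2.getD j 0 + (if (j:Int) = i then pyBit num (j:Int) else 0) := by
  have hset1 : (PySem.List.pySetD q.1 i (PySem.List.pyGetD q.1 i 0 + 1)).getD j 0
      = if (j:Int) = i then q.1.getD j 0 + 1 else q.1.getD j 0 := by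
    rw [PySem.List.pySetD_of_nonneg _ _ hi0, PySem.List.pyGetD_of_nonneg _ _ hi0,
        getD_set_of_lt _ _ _ _ (by omega : i.toNat < q.1.length)]
    by_cases hij : (j:Int) = i
    · have : i.toNat = j := by omega
      simp [this, hij]
    · have : ¬ (i.toNat = j) := by omega
      simp [this, hij]
  have hset2 : (PySem.List.pySetD q.2 i (PySem.List.pyGetD q.2 i 0 + 1)).getD j 0
      = if (j:Int) = i then q.2.getD j 0 + 1 else q.2.getD j 0 := by
    rw [PySem.List.pySetD_of_nonneg _ _ hi0, PySem.List.pyGetD_of_nonneg _ _ hi0,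
        getD_set_of_lt _ _ _ _ (by omega : i.toNat < q.2.length)]
    by_cases hij : (j:Int) = i
    · have : i.toNat = j := by omega
      simp [this, hij]
    · have : ¬ (i.toNat = j) := by omega
      simp [this, hij]
  have hbit : (j:Int) = i → pyBit num (j:Int) = pyBit num i := fun h => by rw [h]
  rcases pyBit01 num i with hb | hb <;> unfold stepBitA <;> refine ⟨?_, ?_⟩
  · rw [show (if pyBit num i = 0 then (PySem.List.pySetD q.1 i (PySem.List.pyGetD q.1 i 0 + 1), q.2)
        else (q.1, PySem.List.pySetD q.2 i (PySem.List.pyGetD q.2 i 0 + 1)))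
        = (PySem.List.pySetD q.1 i (PySem.List.pyGetD q.1 i 0 + 1), q.2) from by simp [hb]]
    rw [hset1]
    by_cases hij : (j:Int) = i
    case pos => simp [hij, hb]
    case neg => simp [hij]
  · rw [show (if pyBit num i = 0 then (PySem.List.pySetD q.1 i (PySem.List.pyGetD q.1 i 0 + 1), q.2)
        else (q.1, PySem.List.pySetD q.2 i (PySem.List.pyGetD q.2 i 0 + 1)))
        = (PySem.List.pySetD q.1 i (PySem.List.pyGetD q.1 i 0 + 1), q.2) from by simp [hb]]
    by_cases hij : (j:Int) = i
    case pos => simp [hij, hb]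
    case neg => simp [hij]
  · rw [show (if pyBit num i = 0 then (PySem.List.pySetD q.1 i (PySem.List.pyGetD q.1 i 0 + 1), q.2)
        else (q.1, PySem.List.pySetD q.2 i (PySem.List.pyGetD q.2 i 0 + 1)))
        = (q.1, PySem.List.pySetD q.2 i (PySem.List.pyGetD q.2 i 0 + 1)) from by simp [hb]]
    by_cases hij : (j:Int) = i
    case pos => simp [hij, hb]
    case neg => simp [hij]
  · rw [show (if pyBit num i = 0 then (PySem.List.pySetD q.1 i (PySem.List.pyGetD q.1 i 0 + 1), q.2)
        else (q.1, PySem.List.pySetD q.2 i (PySem.List.pyGetD q.2 i 0 + 1)))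
        = (q.1, PySem.List.pySetD q.2 i (PySem.List.pyGetD q.2 i 0 + 1)) from by simp [hb]]
    rw [hset2]
    by_cases hij : (j:Int) = i
    case pos => simp [hij, hb]
    case neg => simp [hij]

theorem innerFold_spec (num : Int) (L : List Int) (hb : ∀ i ∈ L, 0 ≤ i ∧ i < 50)
    (hnd : L.Nodup) (q : List Int × List Int) (h1 : q.1.length = 50) (h2 : q.2.length = 50) :
    (L.foldl (stepBitA num) q).1.length = 50 ∧ (L.foldl (stepBitA num) q).2.length = 50 ∧
    ∀ j : Nat, j < 50 →
      (L.foldl (stepBitA num) q).1.getD j 0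
        = q.1.getD j 0 + (if (j:Int) ∈ L then 1 - pyBit num (j:Int) else 0) ∧
      (L.foldl (stepBitA num) q).2.getD j 0
        = q.2.getD j 0 + (if (j:Int) ∈ L then pyBit num (j:Int) else 0) := by
  induction L generalizing q with
  | nil => simp [h1, h2]
  | cons i rest ih =>
    obtain ⟨hi0, hi50⟩ := hb i (List.mem_cons_self ..)
    obtain ⟨hl1, hl2⟩ := stepBitA_len num q i hi0
    obtain ⟨r1, r2, rget⟩ := ih (fun x hx => hb x (List.mem_cons_of_mem _ hx)) hnd.of_cons
      (stepBitA num q i) (hl1.trans h1) (hl2.trans h2)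
    refine ⟨r1, r2, fun j hj => ?_⟩
    obtain ⟨g1, g2⟩ := rget j hj
    obtain ⟨s1, s2⟩ := stepBitA_getD num q i hi0 hi50 h1 h2 j hj
    rw [List.foldl_cons, g1, g2, s1, s2]
    have hmem : ((j:Int) ∈ i :: rest) ↔ ((j:Int) = i ∨ (j:Int) ∈ rest) := List.mem_cons
    by_cases hij : (j:Int) = i
    · have hnr : (j:Int) ∉ rest := hij ▸ (List.nodup_cons.mp hnd).1
      rw [hij] at hnr
      simp [hij, hnr]
    · by_cases hr : (j:Int) ∈ rest <;> simp [hij, hr, hmem]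

theorem range49_bounds : ∀ i ∈ PySem.List.pyRange 49 (-1) (-1), 0 ≤ i ∧ i < 50 := by
  intro i hi
  rw [PySem.List.mem_pyRange_neg_one] at hi
  omega

theorem range49_nodup : (PySem.List.pyRange 49 (-1) (-1)).Nodup := by
  rw [PySem.List.pyRange_neg_one_eq_reverse]
  exact List.nodup_reverse.mpr (PySem.List.nodup_pyRange_one _ _)

theorem outerFold_spec (nums : List Int) :
    ∀ (q : List Int × List Int), q.1.length = 50 → q.2.length = 50 →
    (nums.foldl (fun p num => (PySem.List.pyRange 49 (-1) (-1)).foldl (stepBitA num) p) q).1.length = 50 ∧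
    (nums.foldl (fun p num => (PySem.List.pyRange 49 (-1) (-1)).foldl (stepBitA num) p) q).2.length = 50 ∧
    ∀ j : Nat, j < 50 →
      (nums.foldl (fun p num => (PySem.List.pyRange 49 (-1) (-1)).foldl (stepBitA num) p) q).1.getD j 0
        = q.1.getD j 0 + zerosF nums j ∧
      (nums.foldl (fun p num => (PySem.List.pyRange 49 (-1) (-1)).foldl (stepBitA num) p) q).2.getD j 0
        = q.2.getD j 0 + onesF nums j := by
  induction nums with
  | nil => intro q h1 h2; simp [h1, h2, onesF, zerosF]
  | cons num nums ih =>
    intro q h1 h2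
    obtain ⟨i1, i2, iget⟩ := innerFold_spec num _ range49_bounds range49_nodup q h1 h2
    obtain ⟨r1, r2, rget⟩ := ih _ i1 i2
    refine ⟨r1, r2, fun j hj => ?_⟩
    obtain ⟨g1, g2⟩ := rget j hj
    obtain ⟨s1, s2⟩ := iget j hj
    have hmem : (j:Int) ∈ PySem.List.pyRange 49 (-1) (-1) := by
      rw [PySem.List.mem_pyRange_neg_one]; omega
    rw [List.foldl_cons, g1, g2, s1, s2]
    simp only [hmem, if_true, onesF, zerosF, List.map_cons, List.sum_cons]
    constructor <;> ring

theorem countsA_spec (nums : List Int) :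
    (countsA nums).1.length = 50 ∧ (countsA nums).2.length = 50 ∧
    ∀ j : Nat, j < 50 →
      (countsA nums).1.getD j 0 = zerosF nums j ∧ (countsA nums).2.getD j 0 = onesF nums j := by
  obtain ⟨h1, h2, hget⟩ := outerFold_spec nums (List.replicate 50 0, List.replicate 50 0)
    (by simp) (by simp)
  refine ⟨h1, h2, fun j hj => ?_⟩
  obtain ⟨g1, g2⟩ := hget j hj
  unfold countsA
  rw [g1, g2]
  have hrep : (List.replicate 50 (0:Int)).getD j 0 = 0 := by
    rw [List.getD_eq_getElem?_getD, List.getElem?_replicate]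
    split <;> simp
  rw [hrep]
  constructor <;> ring

theorem getD_map_int (l : List Int) (g : Int → Int) (j : Nat) (hj : j < l.length) :
    (l.map g).getD j 0 = g (l.getD j 0) := by
  simp [List.getD_eq_getElem?_getD, List.getElem?_map, List.getElem?_eq_getElem hj]

theorem onesB_getD (nums : List Int) (j : Nat) (hj : j < 50) :
    (onesB nums).getD j 0 = onesF nums j := by
  have h50 : PySem.List.pyRange 0 (50:Int) 1 = PySem.List.pyRange 0 ((50:Nat):Int) 1 := by norm_num
  have := PySem.List.pyGetD_map_pyRange
    (fun j => nums.foldl (fun s num => s + pyBit num j) 0) 50 j 0 hj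
  unfold onesB
  rw [h50, ← PySem.List.pyGetD_natCast, this]
  show nums.foldl (fun s num => s + pyBit num (j:Int)) 0 = _
  rw [PySem.List.foldl_add]
  simp [onesF]

theorem onesB_length (nums : List Int) : (onesB nums).length = 50 := by
  unfold onesB
  rw [List.length_map, PySem.List.length_pyRange_one]
  rfl

theorem zerosF_eq (nums : List Int) (j : Nat) :
    zerosF nums j = (nums.length : Int) - onesF nums j := by
  induction nums with
  | nil => simp [onesF, zerosF]
  | cons num nums ih =>
    simp only [onesF, zerosF, List.map_cons, List.sum_cons, List.length_cons] at *
    push_cast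
    omega

theorem zerosB_getD (nums : List Int) (j : Nat) (hj : j < 50) :
    (zerosB nums (onesB nums)).getD j 0 = zerosF nums j := by
  unfold zerosB
  rw [getD_map_int _ _ j (by rw [onesB_length]; exact hj), onesB_getD nums j hj,
      zerosF_eq, PySem.List.len_eq]

theorem partialSum_eq_sum (t : Nat → Int) (n : Nat) :
    partialSum t n = ((List.range n).map t).sum := by
  induction n with
  | zero => simp [partialSum]
  | succ n ih => rw [partialSum, List.range_succ, List.map_append, List.sum_append, ih]; simp

theorem prefFold (ones zeros : List Int) (t : Nat → Int)
    (ht : ∀ j : Nat, j < 50 →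
      pyShl1 (j:Int) * min (PySem.List.pyGetD ones (j:Int) 0) (PySem.List.pyGetD zeros (j:Int) 0) = t j)
    (n : Nat) (hn : n ≤ 50) :
    (PySem.List.pyRange 0 (n:Int) 1).foldl (prefStep ones zeros) ([], 0)
      = ((List.range n).map (partialSum t), partialSum t n) := by
  induction n with
  | zero => simp [partialSum, PySem.List.pyRange_one_eq_nil]
  | succ n ih =>
    have h1 : ((n:Int) + 1) = ((n + 1 : Nat) : Int) := by push_cast; ring
    rw [← h1, PySem.List.pyRange_one_succ_right (by positivity), List.foldl_append,
        ih (by omega), List.foldl_cons, List.foldl_nil]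
    unfold prefStep
    rw [List.range_succ, List.map_append]
    have hterm := ht n (by omega)

    rw [hterm]
    simp [partialSum]

theorem mn_sum (cz co : List Int) (t : Nat → Int)
    (ht : ∀ j : Nat, j < 50 → pyShl1 (j:Int) * min (co.getD j 0) (cz.getD j 0) = t j)
    (i : Int) (h0 : 0 ≤ i) (h50 : i ≤ 50) :
    (PySem.List.pyRange (i-1) (-1) (-1)).foldl
      (fun acc j => acc + pyShl1 j * min (PySem.List.pyGetD co j 0) (PySem.List.pyGetD cz j 0)) 0
    = partialSum t i.toNat := by
  rw [PySem.List.foldl_add]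
  have hrev := PySem.List.pyRange_neg_one_eq_reverse (i-1) (-1)
  norm_num at hrev
  rw [hrev, List.map_reverse, List.sum_reverse]
  have hi : i = ((i.toNat : Nat) : Int) := (Int.toNat_of_nonneg h0).symm
  rw [hi, PySem.List.pyRange_zero_nat, List.map_map, partialSum_eq_sum, Int.toNat_natCast, zero_add]
  refine congrArg List.sum (List.map_congr_left ?_)
  intro k hk
  rw [List.mem_range] at hk
  simp only [Function.comp_apply, PySem.List.pyGetD_natCast]
  exact ht k (by omega)

theorem loop_eq (m : Int) (cz co ones zeros pref : List Int) (t : Nat → Int)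
    (hz : ∀ j : Nat, j < 50 → cz.getD j 0 = zeros.getD j 0)
    (ho : ∀ j : Nat, j < 50 → co.getD j 0 = ones.getD j 0)
    (ht : ∀ j : Nat, j < 50 → pyShl1 (j:Int) * min (co.getD j 0) (cz.getD j 0) = t j)
    (hp : ∀ j : Nat, j < 50 → pref.getD j 0 = partialSum t j) :
    ∀ L : List Int, (∀ i ∈ L, 0 ≤ i ∧ i < 50) → ∀ k csum,
      loopA m cz co L k csum = loopB m ones zeros pref L k csum := by
  intro L
  induction L with
  | nil => intro _ k csum; rfl
  | cons i rest ih =>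
    intro hb k csum
    obtain ⟨h0, h50⟩ := hb i (List.mem_cons_self ..)
    have e1 : PySem.List.pyGetD cz i 0 = PySem.List.pyGetD zeros i 0 := by
      rw [PySem.List.pyGetD_of_nonneg _ _ h0, PySem.List.pyGetD_of_nonneg _ _ h0,
          hz i.toNat (by omega)]
    have e2 : PySem.List.pyGetD co i 0 = PySem.List.pyGetD ones i 0 := by
      rw [PySem.List.pyGetD_of_nonneg _ _ h0, PySem.List.pyGetD_of_nonneg _ _ h0,
          ho i.toNat (by omega)]
    have e3 : (PySem.List.pyRange (i-1) (-1) (-1)).foldl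
        (fun acc j => acc + pyShl1 j * min (PySem.List.pyGetD co j 0) (PySem.List.pyGetD cz j 0)) 0
        = PySem.List.pyGetD pref i 0 := by
      rw [mn_sum cz co t ht i h0 (by omega), PySem.List.pyGetD_of_nonneg _ _ h0,
          hp i.toNat (by omega)]
    have e4 : k <<< (1:Nat) = 2 * k := by rw [Int.shiftLeft_eq]; ring
    have ihr := fun k' c' => ih (fun x hx => hb x (List.mem_cons_of_mem _ hx)) k' c'
    simp only [loopA, loopB, e1, e2, e3, e4]
    split_ifs <;> first | (apply ihr) | rfl

theorem prefB_getD (nums : List Int) (j : Nat) (hj : j < 50) :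
    (prefB (onesB nums) (zerosB nums (onesB nums))).getD j 0
      = partialSum (fun j : Nat => pyShl1 (j:Int) * min (onesF nums j) (zerosF nums j)) j := by
  have h50 : PySem.List.pyRange 0 (50:Int) 1 = PySem.List.pyRange 0 ((50:Nat):Int) 1 := by norm_num
  have hfold := prefFold (onesB nums) (zerosB nums (onesB nums))
    (fun j : Nat => pyShl1 (j:Int) * min (onesF nums j) (zerosF nums j))
    (fun j hj => by
      rw [PySem.List.pyGetD_natCast, PySem.List.pyGetD_natCast, onesB_getD nums j hj,
          zerosB_getD nums j hj])
    50 (le_refl _)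
  unfold prefB
  rw [h50, hfold]
  exact PySem.List.getD_map_range _ _ _ _ hj

theorem solve_eq (n : Int) (m : Int) (nums : List Int) : solve n m nums = solve_alt n m nums := by
  obtain ⟨hl1, hl2, hget⟩ := countsA_spec nums
  show loopA m (countsA nums).1 (countsA nums).2 (PySem.List.pyRange 49 (-1) (-1)) 0 0
      = loopB m (onesB nums) (zerosB nums (onesB nums))
          (prefB (onesB nums) (zerosB nums (onesB nums))) (PySem.List.pyRange 49 (-1) (-1)) 0 0
  exact loop_eq m _ _ _ _ _
    (fun j : Nat => pyShl1 (j:Int) * min (onesF nums j) (zerosF nums j))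
    (fun j hj => by rw [(hget j hj).1, zerosB_getD nums j hj])
    (fun j hj => by rw [(hget j hj).2, onesB_getD nums j hj])
    (fun j hj => by rw [(hget j hj).1, (hget j hj).2])
    (fun j hj => prefB_getD nums j hj)
    _ range49_bounds 0 0

-- ===== VERDICT (by name: the statement is the Claim_ definition above) =====
theorem solve_spec : Claim_equal_solve := by
  intro n m nums _
  unfold Spec_solve
  exact solve_eq n m nums
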